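-- pv_equiv track=rewrite | github.com/KaaraOpCode/SIC-AI | wiki scrapper.py | is_article_href
-- ===== SOURCE A (Python) =====
-- ARTICLE_PREFIX = "/wiki/"
--
-- BAD_PREFIXES = (
--     "Category:", "File:", "Help:", "Portal:", "Special:", "Template:",
--     "Template_talk:", "Talk:", "Wikipedia:", "Module:", "Draft:",
--     "Book:", "TimedText:", "MediaWiki:", "Gadget:", "Gadget_definition:"
-- )
--
-- def is_article_href(href: str) -> bool:
--     if not href or not href.startswith(ARTICLE_PREFIX):
--         return False
--     # filter out fragments and query
--     if "#" in href or "?" in href: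
--         return False
--     topic = href.split(ARTICLE_PREFIX, 1)[-1]
--     # Skip non-article namespaces
--     for bad in BAD_PREFIXES:
--         if topic.startswith(bad):
--             return False
--     return True
-- ===== SOURCE B (Python) =====
-- ARTICLE_PREFIX = "/wiki/"
--
-- BAD_PREFIXES = (
--     "Category:", "File:", "Help:", "Portal:", "Special:", "Template:",
--     "Template_talk:", "Talk:", "Wikipedia:", "Module:", "Draft:",
--     "Book:", "TimedText:", "MediaWiki:", "Gadget:", "Gadget_definition:"
-- )
--
-- BAD_NAMESPACES = frozenset(p[:-1] for p in BAD_PREFIXES)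
--
-- def is_article_href(href: str) -> bool:
--     if not href or not href.startswith(ARTICLE_PREFIX):
--         return False
--     if "#" in href or "?" in href:
--         return False
--     topic = href[len(ARTICLE_PREFIX):]
--     if ":" in topic:
--         return topic.split(":", 1)[0] not in BAD_NAMESPACES
--     return True
-- ===== Notes on version B (the rewrite author's own statement) =====
-- stated objective: idiomatic
-- what changed: A scans all 16 bad prefixes with startswith; B extracts the namespace before the first ':' once and does a single membership test in a precomputed frozenset of namespace names.
import Mathlib
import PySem

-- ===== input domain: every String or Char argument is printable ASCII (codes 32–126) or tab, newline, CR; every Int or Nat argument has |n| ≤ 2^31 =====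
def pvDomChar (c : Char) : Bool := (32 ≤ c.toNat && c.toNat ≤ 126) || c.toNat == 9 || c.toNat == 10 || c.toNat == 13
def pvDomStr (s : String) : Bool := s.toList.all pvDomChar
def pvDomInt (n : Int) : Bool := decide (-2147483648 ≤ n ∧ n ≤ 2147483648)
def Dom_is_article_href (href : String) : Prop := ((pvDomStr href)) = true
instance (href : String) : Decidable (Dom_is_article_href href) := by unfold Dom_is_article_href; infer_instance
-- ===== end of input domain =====

-- B replaces A's 16-way prefix scan by extracting the namespace before the first ':' and doing one set lookup (idiomatic; no speed claim).

-- ===== PORT A =====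
def ARTICLE_PREFIX : String := "/wiki/"

def BAD_PREFIXES : List String :=
  ["Category:", "File:", "Help:", "Portal:", "Special:", "Template:",
   "Template_talk:", "Talk:", "Wikipedia:", "Module:", "Draft:",
   "Book:", "TimedText:", "MediaWiki:", "Gadget:", "Gadget_definition:"]

def is_article_href (href : String) : Bool :=
  if href == "" || !(PySem.Str.startswith href ARTICLE_PREFIX) then false
  else if PySem.Str.isIn "#" href || PySem.Str.isIn "?" href then false
  else
    -- split(sep, 1)[-1]: the separator is non-empty so split never raises and returns a
    -- non-empty list, hence [-1] is its last element — getD []/getLastD "" are exact here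
    let topic := ((PySem.Str.splitMax? href ARTICLE_PREFIX 1).getD []).getLastD ""
    -- 'for bad in BAD_PREFIXES: if topic.startswith(bad): return False' then 'return True'
    if BAD_PREFIXES.any (fun bad => PySem.Str.startswith topic bad) then false
    else true

-- ===== PORT B =====
def BAD_NAMESPACES : PySem.Set String :=
  PySem.Set.ofList (BAD_PREFIXES.map (fun p => PySem.Str.slice p none (some (-1))))

def is_article_href_alt (href : String) : Bool :=
  if href == "" || !(PySem.Str.startswith href ARTICLE_PREFIX) then false
  else if PySem.Str.isIn "#" href || PySem.Str.isIn "?" href then false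
  else
    let topic := PySem.Str.slice href (some (PySem.Str.len ARTICLE_PREFIX)) none
    if PySem.Str.isIn ":" topic then
      -- split(":", 1)[0]: non-empty separator, non-empty result list, so [0] is the head — exact here
      !(BAD_NAMESPACES.contains (((PySem.Str.splitMax? topic ":" 1).getD []).headD ""))
    else true

-- ===== PRECONDITION & SPEC =====
def Spec_is_article_href (href : String) (out : Bool) : Prop := out = is_article_href_alt href
instance (href : String) (out : Bool) : Decidable (Spec_is_article_href href out) := by unfold Spec_is_article_href; infer_instance

-- ===== CLAIM (what is proved, stated in full; the proofs are below) =====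
def Claim_equal_is_article_href : Prop := ∀ (href : String), Dom_is_article_href href → Spec_is_article_href href (is_article_href href)

-- ===== LEMMAS AND PROOFS =====

-- splitOnMax.go with 0 splits left returns the rest as the final piece
lemma go_zero (sep : List Char) (fuel : Nat) (l cur : List Char) (acc : List (List Char)) :
    PySem.Chars.splitOnMax.go sep fuel 0 l cur acc = ((cur.reverse ++ l) :: acc).reverse := by
  cases fuel with
  | zero => simp [PySem.Chars.splitOnMax.go]
  | succ f => cases l <;> simp [PySem.Chars.splitOnMax.go]

-- splitOnMax.go cuts at an occurrence of sep at the current position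
lemma go_step (sep : List Char) (fuel : Nat) (l cur : List Char) (acc : List (List Char))
    (hsep : sep ≠ []) (hp : sep.isPrefixOf l = true) :
    PySem.Chars.splitOnMax.go sep (fuel + 1) 1 l cur acc =
      PySem.Chars.splitOnMax.go sep fuel 0 (l.drop sep.length) [] (cur.reverse :: acc) := by
  cases l with
  | nil =>
    obtain ⟨c, sep', rfl⟩ := List.exists_cons_of_ne_nil hsep
    simp [List.isPrefixOf] at hp
  | cons c l' => simp [PySem.Chars.splitOnMax.go, hp]

-- s.split(sep, 1) when the non-empty sep is a prefix of s: ["", rest]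
lemma splitOnMax_prefix (sep rest : List Char) (hsep : sep ≠ []) :
    PySem.Chars.splitOnMax (sep ++ rest) sep 1 = [[], rest] := by
  have hp : sep.isPrefixOf (sep ++ rest) = true :=
    List.isPrefixOf_iff_prefix.mpr (List.prefix_append _ _)
  simp only [PySem.Chars.splitOnMax]
  norm_num
  rw [go_step sep _ _ _ _ hsep hp, go_zero, List.drop_left]
  simp

-- the go loop of t.split(":", 1), by takeWhile/dropWhile
lemma go_colon (t : List Char) : ∀ (fuel : Nat) (cur : List Char), t.length < fuel →
    PySem.Chars.splitOnMax.go [':'] fuel 1 t cur [] =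
      if ':' ∈ t then [cur.reverse ++ t.takeWhile (· != ':'), (t.dropWhile (· != ':')).tail]
      else [cur.reverse ++ t] := by
  induction t with
  | nil =>
    intro fuel cur h
    cases fuel with
    | zero => omega
    | succ f => simp [PySem.Chars.splitOnMax.go]
  | cons c t ih =>
    intro fuel cur h
    cases fuel with
    | zero => omega
    | succ f =>
      by_cases hc : c = ':'
      · subst hc
        simp [PySem.Chars.splitOnMax.go, List.isPrefixOf, go_zero]
      · have hnp : [':'].isPrefixOf (c :: t) = false := by
          simp [List.isPrefixOf]; exact fun h => absurd h.symm hc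
        simp only [PySem.Chars.splitOnMax.go, hnp, Nat.succ_ne_zero, if_false,
          Bool.false_eq_true]
        rw [ih f (c :: cur) (by simpa using Nat.lt_of_succ_lt_succ h)]
        simp [hc, Ne.symm]

-- t.split(":", 1), closed form
lemma splitOnMax_colon (t : List Char) :
    PySem.Chars.splitOnMax t [':'] 1 =
      if ':' ∈ t then [t.takeWhile (· != ':'), (t.dropWhile (· != ':')).tail] else [t] := by
  simp only [PySem.Chars.splitOnMax]
  norm_num
  rw [go_colon t (t.length + 1) [] (by omega)]
  simp

-- a singleton substring test is membership
lemma isIn_singleton (c : Char) (t : List Char) : PySem.Chars.isIn [c] t = true ↔ c ∈ t := by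
  rw [PySem.Chars.isIn_iff_infix]
  constructor
  · intro h; exact h.mem (by simp)
  · intro h; obtain ⟨s, r, rfl⟩ := List.append_of_mem h; exact ⟨s, r, by simp⟩

lemma takeWhile_append_colon (ns u : List Char) (hns : ':' ∉ ns) :
    (ns ++ ':' :: u).takeWhile (· != ':') = ns := by
  induction ns with
  | nil => simp
  | cons a ns ih =>
    simp only [List.mem_cons, not_or] at hns
    simp [Ne.symm hns.1, ih hns.2]

-- t starts with "Ns:" iff t contains ':' and its part before the first ':' is Ns
lemma startswith_colon_iff (ns t : List Char) (hns : ':' ∉ ns) :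
    (ns ++ [':']) <+: t ↔ (':' ∈ t ∧ t.takeWhile (· != ':') = ns) := by
  constructor
  · rintro ⟨u, rfl⟩
    refine ⟨by simp, ?_⟩
    rw [List.append_assoc]
    exact takeWhile_append_colon ns u hns
  · rintro ⟨hmem, htw⟩
    have hsplit := List.takeWhile_append_dropWhile (p := (· != ':')) (l := t)
    have hne : t.dropWhile (· != ':') ≠ [] := by
      rw [Ne, List.dropWhile_eq_nil_iff]
      intro hall
      simpa using hall ':' hmem
    obtain ⟨d, u, hd⟩ := List.exists_cons_of_ne_nil hne
    have hdc : d = ':' := by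
      have h2 := List.head_dropWhile_not (p := (· != ':')) (l := t) hne
      simp only [hd, List.head_cons] at h2
      simpa using h2
    refine ⟨u, ?_⟩
    rw [← hsplit, htw, hd, hdc]
    simp

-- comparing a rebuilt string with a literal is comparing the character lists
lemma ofList_beq (l : List Char) (s : String) : (String.ofList l == s) = decide (l = s.toList) := by
  rw [Bool.eq_iff_iff]
  simp only [beq_iff_eq, decide_eq_true_eq]
  constructor
  · rintro rfl; simp
  · rintro rfl; simp [String.ofList]

-- the value of the literal namespace set
lemma bad_namespaces_eq : BAD_NAMESPACES =
    ["Category", "File", "Help", "Portal", "Special", "Template", "Template_talk",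
     "Talk", "Wikipedia", "Module", "Draft", "Book", "TimedText", "MediaWiki",
     "Gadget", "Gadget_definition"] := by decide

-- ===== VERDICT (by name: the statement is the Claim_ definition above) =====
theorem is_article_href_spec : Claim_equal_is_article_href := by
  intro href _
  unfold Spec_is_article_href is_article_href is_article_href_alt
  by_cases h1 : (href == "" || !(PySem.Str.startswith href ARTICLE_PREFIX)) = true
  · rw [if_pos h1, if_pos h1]
  · rw [if_neg h1, if_neg h1]
    by_cases h2 : (PySem.Str.isIn "#" href || PySem.Str.isIn "?" href) = true
    · rw [if_pos h2, if_pos h2]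
    · rw [if_neg h2, if_neg h2]
      simp only [Bool.or_eq_true, not_or, Bool.not_eq_true'] at h1
      have hpre : ARTICLE_PREFIX.toList <+: href.toList := by
        have := h1.2
        simp only [Bool.not_eq_false, PySem.Str.startswith_eq] at this
        exact (PySem.Chars.startswith_iff _ _).mp this
      obtain ⟨rest, hrest⟩ := hpre
      have htA : ((PySem.Str.splitMax? href ARTICLE_PREFIX 1).getD []).getLastD ""
          = String.ofList rest := by
        simp only [PySem.Str.splitMax?, PySem.Chars.splitMax?, ← hrest]
        rw [if_neg (by decide)]
        rw [splitOnMax_prefix _ _ (by decide)]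
        simp
      have htB : (PySem.Str.slice href (some (PySem.Str.len ARTICLE_PREFIX)) none).toList
          = rest := by
        rw [show PySem.Str.len ARTICLE_PREFIX = (6 : Int) from by decide]
        simp only [PySem.Str.toList_slice, PySem.Chars.slice_eq_listSlice]
        rw [PySem.List.slice_from _ (by norm_num), ← hrest]
        rw [show ((6 : Int)).toNat = 6 from rfl]
        exact List.drop_left' (by decide)
      have hol : (String.ofList rest).toList = rest := by simp
      have hhead : ((PySem.Str.splitMax? (PySem.Str.slice href (some (PySem.Str.len ARTICLE_PREFIX)) none) ":" 1).getD []).headD ""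
          = String.ofList (if ':' ∈ rest then rest.takeWhile (· != ':') else rest) := by
        simp only [PySem.Str.splitMax?, PySem.Chars.splitMax?, htB]
        rw [if_neg (by decide), show (":" : String).toList = [':'] from rfl, splitOnMax_colon]
        by_cases hm : ':' ∈ rest <;> simp [hm]
      have hisin : PySem.Str.isIn ":" (PySem.Str.slice href (some (PySem.Str.len ARTICLE_PREFIX)) none)
          = decide (':' ∈ rest) := by
        rw [PySem.Str.isIn_eq, Bool.eq_iff_iff]
        rw [show (":" : String).toList = [':'] from rfl, htB, isIn_singleton]
        simp
      have hsw : ∀ (bad : String) (ns : List Char), bad.toList = ns ++ [':'] → ':' ∉ ns →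
          PySem.Str.startswith (String.ofList rest) bad
            = (decide (':' ∈ rest) && decide (rest.takeWhile (· != ':') = ns)) := by
        intro bad ns hb hns
        rw [Bool.eq_iff_iff]
        simp only [PySem.Str.startswith_eq, Bool.and_eq_true, decide_eq_true_eq]
        rw [PySem.Chars.startswith_iff, hol, hb, startswith_colon_iff ns rest hns]
      have hall : BAD_PREFIXES.any (fun bad => PySem.Str.startswith (String.ofList rest) bad)
          = (decide (':' ∈ rest)
              && BAD_NAMESPACES.contains (String.ofList (rest.takeWhile (· != ':')))) := by
        rw [bad_namespaces_eq]
        simp only [BAD_PREFIXES, List.any_cons, List.any_nil]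
        rw [hsw "Category:" "Category".toList (by decide) (by decide),
            hsw "File:" "File".toList (by decide) (by decide),
            hsw "Help:" "Help".toList (by decide) (by decide),
            hsw "Portal:" "Portal".toList (by decide) (by decide),
            hsw "Special:" "Special".toList (by decide) (by decide),
            hsw "Template:" "Template".toList (by decide) (by decide),
            hsw "Template_talk:" "Template_talk".toList (by decide) (by decide),
            hsw "Talk:" "Talk".toList (by decide) (by decide),
            hsw "Wikipedia:" "Wikipedia".toList (by decide) (by decide),
            hsw "Module:" "Module".toList (by decide) (by decide),
            hsw "Draft:" "Draft".toList (by decide) (by decide),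
            hsw "Book:" "Book".toList (by decide) (by decide),
            hsw "TimedText:" "TimedText".toList (by decide) (by decide),
            hsw "MediaWiki:" "MediaWiki".toList (by decide) (by decide),
            hsw "Gadget:" "Gadget".toList (by decide) (by decide),
            hsw "Gadget_definition:" "Gadget_definition".toList (by decide) (by decide)]
        simp only [PySem.Set.contains, List.contains_cons, List.contains_nil, ofList_beq]
        cases hd : decide (':' ∈ rest) <;> simp
      simp only [htA, hhead, hisin, hall]
      by_cases hm : ':' ∈ rest
      · simp [hm]
      · simp [hm]
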